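-- pv_equiv track=rewrite | github.com/bcgov/namex | api/namex/resources/phonetic/__init__.py | first_consonants
-- ===== SOURCE A (Python) =====
-- def first_consonants(word):
--     consonants = ['B', 'C', 'D', 'F', 'G', 'H', 'J', 'K', 'L', 'M', 'N', 'P', 'Q', 'R', 'S', 'T', 'X']
--     value = ''
--     first_consonant_found = False
--     for letter in word:
--         if letter not in consonants and first_consonant_found:
--             break
--         if letter in consonants:
--             value += letter
--             first_consonant_found = True
--
--     return value
-- ===== SOURCE B (Python) =====
-- def first_consonants(word):
--     consonants = set('BCDFGHJKLMNPQRSTX')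
--     runs = ''.join(c if c in consonants else ' ' for c in word).split()
--     return runs[0] if runs else ''
-- ===== Notes on version B (the rewrite author's own statement) =====
-- stated objective: alternative
-- what changed: Instead of A's early-breaking stateful scan with a found-flag and string concatenation, B masks every non-consonant to a space over the whole word, tokenises with str.split(), and returns the first token (or '' if none) -- a whole-string segmentation rather than a prefix scan.
import Mathlib
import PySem

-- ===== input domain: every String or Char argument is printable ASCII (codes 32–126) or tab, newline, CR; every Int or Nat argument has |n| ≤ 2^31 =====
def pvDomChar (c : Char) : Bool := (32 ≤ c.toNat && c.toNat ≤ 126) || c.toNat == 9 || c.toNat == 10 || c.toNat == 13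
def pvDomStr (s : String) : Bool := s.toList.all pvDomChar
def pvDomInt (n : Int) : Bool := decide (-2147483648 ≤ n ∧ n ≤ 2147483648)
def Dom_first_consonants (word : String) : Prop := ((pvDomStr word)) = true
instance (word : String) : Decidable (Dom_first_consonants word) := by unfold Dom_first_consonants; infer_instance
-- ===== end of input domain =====

-- B replaces A's early-breaking stateful scan by a whole-string segmentation:
-- mask non-consonants to spaces, split into tokens, take the first; same O(n) cost.

-- ===== PORT A =====
def pvConsonantsA : List Char :=
  ['B', 'C', 'D', 'F', 'G', 'H', 'J', 'K', 'L', 'M', 'N', 'P', 'Q', 'R', 'S', 'T', 'X']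

-- the for-loop with `break`: recursion over the remaining letters with (value, flag) state
def pvLoopA : List Char → String → Bool → String
  | [], value, _ => value
  | letter :: rest, value, found =>
    if letter ∉ pvConsonantsA ∧ found then value
    else if letter ∈ pvConsonantsA then pvLoopA rest (value.push letter) true
    else pvLoopA rest value found

def first_consonants (word : String) : String :=
  pvLoopA word.toList "" false

-- ===== PORT B =====
def pvConsB : PySem.Set Char := PySem.Set.ofList "BCDFGHJKLMNPQRSTX".toList

-- ''.join(c if c in consonants else ' ' for c in word)
def pvMask (c : Char) : Char := if pvConsB.contains c then c else ' '

def first_consonants_alt (word : String) : String :=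
  match PySem.Str.split₀ (String.ofList (word.toList.map pvMask)) with
  | [] => ""
  | t :: _ => t

-- ===== PRECONDITION & SPEC =====
def Spec_first_consonants (word : String) (out : String) : Prop := out = first_consonants_alt word
instance (word : String) (out : String) : Decidable (Spec_first_consonants word out) := by unfold Spec_first_consonants; infer_instance

-- ===== CLAIM =====
def Claim_equal_first_consonants : Prop := ∀ (word : String), Dom_first_consonants word → Spec_first_consonants word (first_consonants word)

-- ===== LEMMAS AND PROOFS =====

-- head of a word list (as List Char), [] for none
def pvHeadL (xs : List (List Char)) : List Char :=
  match xs with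
  | [] => []
  | t :: _ => t

theorem pvConsB_eq : pvConsB = pvConsonantsA := by decide

theorem pvConsB_agree (c : Char) : (c ∈ pvConsonantsA) ↔ pvConsB.contains c = true := by
  rw [pvConsB_eq]
  simp [PySem.Set.contains]

theorem pvCons_not_space (c : Char) (h : c ∈ pvConsonantsA) :
    PySem.Chars.isspace c = false := by fin_cases h <;> decide

theorem pvMask_cons (c : Char) (h : c ∈ pvConsonantsA) : pvMask c = c := by
  unfold pvMask
  rw [if_pos ((pvConsB_agree c).mp h)]

theorem pvMask_not_cons (c : Char) (h : c ∉ pvConsonantsA) : pvMask c = ' ' := by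
  unfold pvMask
  rw [if_neg (fun hc => h ((pvConsB_agree c).mpr hc))]

-- once a word w sits at the bottom of the accumulator, it is the head of the result
theorem pvGo_head_acc (l cur : List Char) (acc : List (List Char)) (w : List Char) :
    pvHeadL (PySem.Chars.split₀.go l cur (acc ++ [w])) = w := by
  induction l generalizing cur acc with
  | nil =>
    rw [PySem.Chars.split₀.go]
    by_cases h : cur.isEmpty = true <;> simp [h, pvHeadL]
  | cons c cs ih =>
    rw [PySem.Chars.split₀.go]
    by_cases hs : PySem.Chars.isspace c = true
    · by_cases h : cur.isEmpty = true
      · simp only [hs, h, if_true]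
        exact ih [] acc
      · simp only [hs, h, if_true, if_false]
        have : cur.reverse :: (acc ++ [w]) = (cur.reverse :: acc) ++ [w] := by simp
        rw [this]
        exact ih [] (cur.reverse :: acc)
    · simp only [hs, if_false]
      exact ih (c :: cur) acc

-- collect phase: flag set, nonempty current word
theorem pvLoopA_collect (l : List Char) (cur : List Char) (h : cur ≠ []) :
    pvLoopA l (String.ofList cur.reverse) true
      = String.ofList (pvHeadL (PySem.Chars.split₀.go (l.map pvMask) cur [])) := by
  induction l generalizing cur with
  | nil =>
    rw [List.map_nil, PySem.Chars.split₀.go]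
    simp [List.isEmpty_iff, h, pvHeadL, pvLoopA]
  | cons c cs ih =>
    by_cases hc : c ∈ pvConsonantsA
    · rw [List.map_cons, pvMask_cons c hc, PySem.Chars.split₀.go]
      simp only [pvCons_not_space c hc, Bool.false_eq_true, if_false]
      have hpush : (String.ofList cur.reverse).push c = String.ofList (c :: cur).reverse := by
        apply String.toList_inj.mp; simp
      rw [show pvLoopA (c :: cs) (String.ofList cur.reverse) true
            = pvLoopA cs ((String.ofList cur.reverse).push c) true by simp [pvLoopA, hc],
          hpush]
      exact ih (c :: cur) (by simp)
    · rw [List.map_cons, pvMask_not_cons c hc, PySem.Chars.split₀.go]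
      simp only [show PySem.Chars.isspace ' ' = true from rfl, if_true]
      rw [if_neg (by simp [List.isEmpty_iff, h] : ¬ cur.isEmpty = true)]
      rw [show pvLoopA (c :: cs) (String.ofList cur.reverse) true
            = String.ofList cur.reverse by simp [pvLoopA, hc]]
      have := pvGo_head_acc (cs.map pvMask) [] [] cur.reverse
      rw [List.nil_append] at this
      rw [this]

-- search phase: flag unset, empty current word
theorem pvLoopA_search (l : List Char) :
    pvLoopA l "" false
      = String.ofList (pvHeadL (PySem.Chars.split₀.go (l.map pvMask) [] [])) := by
  induction l with
  | nil => rw [List.map_nil, PySem.Chars.split₀.go]; rfl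
  | cons c cs ih =>
    by_cases hc : c ∈ pvConsonantsA
    · rw [List.map_cons, pvMask_cons c hc, PySem.Chars.split₀.go]
      simp only [pvCons_not_space c hc, Bool.false_eq_true, if_false]
      rw [show pvLoopA (c :: cs) "" false = pvLoopA cs ("".push c) true by simp [pvLoopA, hc]]
      have : ("" : String).push c = String.ofList ([c] : List Char).reverse := by
        apply String.toList_inj.mp; simp
      rw [this]
      exact pvLoopA_collect cs [c] (by simp)
    · rw [List.map_cons, pvMask_not_cons c hc, PySem.Chars.split₀.go]
      simp only [show PySem.Chars.isspace ' ' = true from rfl, if_true,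
        show (([] : List Char)).isEmpty = true from rfl]
      rw [show pvLoopA (c :: cs) "" false = pvLoopA cs "" false by simp [pvLoopA, hc]]
      exact ih

theorem pvHead_map_ofList (xs : List (List Char)) :
    (match xs.map String.ofList with
      | [] => ""
      | t :: _ => t) = String.ofList (pvHeadL xs) := by
  cases xs <;> rfl

-- ===== VERDICT =====
theorem first_consonants_spec : Claim_equal_first_consonants := by
  intro word _
  unfold Spec_first_consonants first_consonants first_consonants_alt
  rw [PySem.Str.split₀]
  rw [show (String.ofList (word.toList.map pvMask)).toList = word.toList.map pvMask by simp]
  rw [pvHead_map_ofList]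
  exact pvLoopA_search word.toList
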